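-- pv_equiv track=rewrite | github.com/lns2bt/PixelDock32 | app/services/patterns.py | vertical_stripes
-- ===== SOURCE A (Python) =====
-- Frame = list[list[int]]
--
-- def blank(width: int = 32, height: int = 8) -> Frame:
--     return [[0 for _ in range(width)] for _ in range(height)]
--
-- def vertical_stripes(step: int, width: int = 32, height: int = 8) -> Frame:
--     frame = blank(width, height)
--     shift = step % 2
--     for y in range(height):
--         for x in range(width):
--             if (x + shift) % 2 == 0:
--                 frame[y][x] = 1
--     return frame
-- ===== SOURCE B (Python) =====
-- def vertical_stripes(step: int, width: int = 32, height: int = 8):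
--     if height <= 0:
--         return []
--     shift = step % 2
--     row = [1 if (x + shift) % 2 == 0 else 0 for x in range(width)]
--     return [row[:] for _ in range(height)]
-- ===== Notes on version B (the rewrite author's own statement) =====
-- stated objective: simpler
-- what changed: Rows do not depend on y, so B computes one stripe row once and replicates copies of it, replacing A's blank-frame allocation plus per-cell nested mutation loops.
import Mathlib
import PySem

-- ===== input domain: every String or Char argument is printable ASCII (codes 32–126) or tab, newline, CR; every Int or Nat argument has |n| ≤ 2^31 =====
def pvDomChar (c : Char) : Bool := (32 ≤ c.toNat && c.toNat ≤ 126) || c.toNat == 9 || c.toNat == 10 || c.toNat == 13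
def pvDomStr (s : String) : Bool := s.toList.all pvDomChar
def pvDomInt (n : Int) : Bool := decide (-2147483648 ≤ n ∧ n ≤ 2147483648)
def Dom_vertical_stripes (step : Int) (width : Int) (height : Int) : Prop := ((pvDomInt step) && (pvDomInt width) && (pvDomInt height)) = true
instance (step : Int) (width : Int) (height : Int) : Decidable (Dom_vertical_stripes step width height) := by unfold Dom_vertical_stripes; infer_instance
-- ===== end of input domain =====

-- B replaces A's blank frame + nested per-cell mutation loops by computing one stripe row and replicating copies of it (simpler decomposition, same cost).

-- ===== PORT A =====
def vertical_stripes (step : Int) (width : Int) (height : Int) : List (List Int) :=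
  let frame : List (List Int) :=
    (PySem.List.pyRange 0 height 1).map (fun _ => (PySem.List.pyRange 0 width 1).map (fun _ => (0 : Int)))
  let shift := PySem.Int.mod step 2
  (PySem.List.pyRange 0 height 1).foldl (fun fr y =>
    (PySem.List.pyRange 0 width 1).foldl (fun fr x =>
      if PySem.Int.mod (x + shift) 2 = 0 then
        fr.set y.toNat ((fr.getD y.toNat []).set x.toNat 1)
      else fr) fr) frame

-- ===== PORT B =====
def vertical_stripes_alt (step : Int) (width : Int) (height : Int) : List (List Int) :=
  if height ≤ 0 then []
  else
  let shift := PySem.Int.mod step 2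
  let row : List Int :=
    (PySem.List.pyRange 0 width 1).map (fun x => if PySem.Int.mod (x + shift) 2 = 0 then (1 : Int) else 0)
  (PySem.List.pyRange 0 height 1).map (fun _ => row)

-- ===== PRECONDITION & SPEC =====
def Spec_vertical_stripes (step : Int) (width : Int) (height : Int) (out : List (List Int)) : Prop := out = vertical_stripes_alt step width height
instance (step : Int) (width : Int) (height : Int) (out : List (List Int)) : Decidable (Spec_vertical_stripes step width height out) := by unfold Spec_vertical_stripes; infer_instance

-- ===== CLAIM (what is proved, stated in full; the proofs are below) =====
def Claim_equal_vertical_stripes : Prop := ∀ (step : Int) (width : Int) (height : Int), Dom_vertical_stripes step width height → Spec_vertical_stripes step width height (vertical_stripes step width height)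

-- ===== LEMMAS AND PROOFS =====

-- the inner loop only touches row y: it factors as one List.set of the transformed row
theorem pv_inner_fold {c : Int → Prop} [DecidablePred c]
    (xs : List Int) (fr : List (List Int)) (y : Nat) (hy : y < fr.length) :
    xs.foldl (fun fr x => if c x then fr.set y ((fr.getD y []).set x.toNat 1) else fr) fr
      = fr.set y (xs.foldl (fun r x => if c x then r.set x.toNat 1 else r) (fr.getD y [])) := by
  induction xs generalizing fr with
  | nil =>
    simp only [List.foldl_nil, List.getD, List.getElem?_eq_getElem hy, Option.getD_some,
      List.set_getElem_self]
  | cons x xs ih =>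
    simp only [List.foldl_cons]
    by_cases hc : c x
    · simp only [if_pos hc]
      rw [ih _ (by simpa using hy)]
      simp only [List.getD, List.getElem?_set_self (by simpa using hy), Option.getD_some,
        List.set_set]
    · simp only [if_neg hc]
      exact ih fr hy

-- the row loop over range(n) rewrites the first n entries pointwise
theorem pv_row_fold {c : Int → Prop} [DecidablePred c] (n : Nat) (r : List Int) :
    (PySem.List.pyRange 0 n 1).foldl (fun r x => if c x then r.set x.toNat 1 else r) r
      = r.mapIdx (fun i v => if i < n ∧ c (i : Int) then 1 else v) := by
  induction n with
  | zero =>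
    simp [PySem.List.pyRange_one_eq_nil]
    apply List.ext_getElem <;> simp
  | succ n ih =>
    have hr : PySem.List.pyRange 0 ((n : Int) + 1) 1
        = PySem.List.pyRange 0 (n : Int) 1 ++ [(n : Int)] :=
      PySem.List.pyRange_one_succ_right (by exact_mod_cast Int.natCast_nonneg n)
    have hcast : ((n + 1 : Nat) : Int) = (n : Int) + 1 := by push_cast; ring
    rw [hcast, hr, List.foldl_append, ih]
    by_cases hc : c (n : Int)
    · simp only [List.foldl_cons, List.foldl_nil, if_pos hc, Int.toNat_natCast]
      apply List.ext_getElem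
      · simp
      · intro i h1 h2
        by_cases hin : i = n
        · subst hin
          simp [List.getElem_mapIdx, hc]
        · have hlen : i < r.length := by simpa using h2
          rw [List.getElem_set_ne (by omega)]
          simp only [List.getElem_mapIdx]
          have : (i < n ∧ c (i : Int)) ↔ (i < n + 1 ∧ c (i : Int)) := by
            constructor
            · rintro ⟨h, hcv⟩; exact ⟨by omega, hcv⟩
            · rintro ⟨h, hcv⟩; exact ⟨by omega, hcv⟩
          simp [this]
    · simp only [List.foldl_cons, List.foldl_nil, if_neg hc]
      apply List.ext_getElem
      · simp
      · intro i h1 h2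
        simp only [List.getElem_mapIdx]
        by_cases hin : i = n
        · subst hin
          simp [hc]
        · have : (i < n ∧ c (i : Int)) ↔ (i < n + 1 ∧ c (i : Int)) := by
            constructor
            · rintro ⟨h, hcv⟩; exact ⟨by omega, hcv⟩
            · rintro ⟨h, hcv⟩; exact ⟨by omega, hcv⟩
          simp [this]

-- the outer loop touches each row index once, so it is a guarded pointwise map over the frame
theorem pv_outer_fold {c : Int → Prop} [DecidablePred c] (w : Int) (n : Nat)
    (fr : List (List Int)) (hn : n ≤ fr.length) :
    (PySem.List.pyRange 0 n 1).foldl (fun fr y =>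
      (PySem.List.pyRange 0 w 1).foldl (fun fr x =>
        if c x then fr.set y.toNat ((fr.getD y.toNat []).set x.toNat 1) else fr) fr) fr
    = fr.mapIdx (fun i r => if i < n then
        (PySem.List.pyRange 0 w 1).foldl (fun r x => if c x then r.set x.toNat 1 else r) r
      else r) := by
  induction n with
  | zero =>
    simp [PySem.List.pyRange_one_eq_nil]
    apply List.ext_getElem <;> simp
  | succ n ih =>
    have hr : PySem.List.pyRange 0 ((n : Int) + 1) 1
        = PySem.List.pyRange 0 (n : Int) 1 ++ [(n : Int)] :=
      PySem.List.pyRange_one_succ_right (by exact_mod_cast Int.natCast_nonneg n)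
    have hcast : ((n + 1 : Nat) : Int) = (n : Int) + 1 := by push_cast; ring
    rw [hcast, hr, List.foldl_append, ih (by omega)]
    simp only [List.foldl_cons, List.foldl_nil, Int.toNat_natCast]
    have hlen : n < (fr.mapIdx (fun i r => if i < n then
        (PySem.List.pyRange 0 w 1).foldl (fun r x => if c x then r.set x.toNat 1 else r) r
      else r)).length := by simpa using (by omega : n < fr.length)
    rw [pv_inner_fold _ _ n hlen]
    have hget : (fr.mapIdx (fun i r => if i < n then
        (PySem.List.pyRange 0 w 1).foldl (fun r x => if c x then r.set x.toNat 1 else r) r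
      else r)).getD n [] = fr[n]'(by omega) := by
      simp only [List.getD, List.getElem?_eq_getElem hlen, Option.getD_some, List.getElem_mapIdx]
      simp
    rw [hget]
    apply List.ext_getElem
    · simp
    · intro i h1 h2
      by_cases hin : i = n
      · subst hin
        simp [List.getElem_mapIdx]
      · have hi : i < fr.length := by simpa using h2
        rw [List.getElem_set_ne (by omega)]
        simp only [List.getElem_mapIdx]
        by_cases h4 : i < n
        · rw [if_pos h4, if_pos (by omega)]
        · rw [if_neg h4, if_neg (by omega)]

-- ===== VERDICT (by name: the statement is the Claim_ definition above) =====
theorem vertical_stripes_spec : Claim_equal_vertical_stripes := by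
  intro step width height _
  unfold Spec_vertical_stripes vertical_stripes vertical_stripes_alt
  by_cases hneg : height ≤ 0
  · rw [if_pos hneg]
    simp [PySem.List.pyRange_one_eq_nil (by omega : height ≤ 0)]
  rw [if_neg hneg]
  set shift := PySem.Int.mod step 2 with hshift
  have hh0 : (0:Int) ≤ height ∨ height < 0 := by omega
  have hH : PySem.List.pyRange 0 height 1 = PySem.List.pyRange 0 (height.toNat : Int) 1 := by
    by_cases h : 0 ≤ height
    · rw [Int.toNat_of_nonneg h]
    · rw [PySem.List.pyRange_one_eq_nil (by omega), PySem.List.pyRange_one_eq_nil (by omega)]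
  have hW : PySem.List.pyRange 0 width 1 = PySem.List.pyRange 0 (width.toNat : Int) 1 := by
    by_cases h : 0 ≤ width
    · rw [Int.toNat_of_nonneg h]
    · rw [PySem.List.pyRange_one_eq_nil (by omega), PySem.List.pyRange_one_eq_nil (by omega)]
  rw [hH, hW]
  rw [pv_outer_fold (c := fun x => PySem.Int.mod (x + shift) 2 = 0) (width.toNat : Int) height.toNat _
    (by simp [PySem.List.length_pyRange_one])]
  apply List.ext_getElem
  · simp
  · intro i h1 h2
    simp only [List.getElem_mapIdx, List.getElem_map]
    have hi : i < height.toNat := by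
      simp [PySem.List.length_pyRange_one] at h2; omega
    rw [if_pos hi]
    rw [pv_row_fold (c := fun x => PySem.Int.mod (x + shift) 2 = 0) width.toNat]
    apply List.ext_getElem
    · simp
    · intro j h3 h4
      have hj : j < width.toNat := by
        simp [PySem.List.length_pyRange_one] at h4; omega
      simp only [List.getElem_mapIdx, List.getElem_map, PySem.List.getElem_pyRange_one]
      simp [hj]
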